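-- pv_equiv track=rewrite | github.com/Valente-math/Coinsleuth | codebase/coin_sleuth/sleuthbuilder.py | get_run_counts
-- ===== SOURCE A (Python) =====
-- def get_run_counts(sequence):
--     if not sequence:
--         return []
--
--     N = len(sequence)
--     counts = [0] * N
--     current_run_length = 1
--     current_char = sequence[0]
--
--     for i in range(1, N):
--         if sequence[i] == current_char:
--             current_run_length += 1
--         else:
--             if current_run_length <= N:
--                 counts[current_run_length - 1] += 1
--             current_run_length = 1
--             current_char = sequence[i]
--
--     if current_run_length <= N:
--         counts[current_run_length - 1] += 1
--
--     return counts
-- ===== SOURCE B (Python) =====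
-- def get_run_counts(sequence):
--     if not sequence:
--         return []
--     # stage 1: split the sequence into maximal runs, collecting their lengths
--     n = len(sequence)
--     lengths = []
--     i = 0
--     while i < n:
--         j = i + 1
--         while j < n and sequence[j] == sequence[i]:
--             j += 1
--         lengths.append(j - i)
--         i = j
--     # stage 2: tally the run lengths
--     counts = [0] * n
--     for r in lengths:
--         counts[r - 1] += 1
--     return counts
-- ===== Notes on version B (the rewrite author's own statement) =====
-- stated objective: simpler
-- what changed: Replaces the inline current_char/current_run_length state machine (with its redundant run_length <= N guard) by a two-stage group-then-tally: first split the sequence into maximal runs collecting their lengths, then tally each length into the counts array.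
import Mathlib
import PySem

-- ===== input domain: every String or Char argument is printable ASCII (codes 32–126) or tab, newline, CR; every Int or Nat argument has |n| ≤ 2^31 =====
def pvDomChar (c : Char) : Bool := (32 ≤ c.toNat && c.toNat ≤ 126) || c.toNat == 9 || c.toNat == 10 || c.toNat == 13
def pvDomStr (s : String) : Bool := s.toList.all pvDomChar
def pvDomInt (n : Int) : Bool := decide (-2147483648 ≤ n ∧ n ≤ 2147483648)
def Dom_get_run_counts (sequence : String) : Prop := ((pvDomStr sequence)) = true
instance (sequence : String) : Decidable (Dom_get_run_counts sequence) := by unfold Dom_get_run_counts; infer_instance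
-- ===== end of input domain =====

-- B replaces A's inline state machine by a two-stage group-then-tally decomposition (objective: simpler).

-- counts[i] += 1 (index always in range on the inputs both programs reach)
def pvIncAt (l : List Int) (i : Nat) : List Int := l.set i (l.getD i 0 + 1)

-- ===== PORT A =====
-- the body of A's for-loop, on state (counts, current_run_length, current_char)
def pvAStep (N : Int) (st : List Int × Int × Char) (c : Char) : List Int × Int × Char :=
  if c == st.2.2 then (st.1, st.2.1 + 1, st.2.2)
  else ((if st.2.1 ≤ N then pvIncAt st.1 (st.2.1 - 1).toNat else st.1), 1, c)

def get_run_counts (sequence : String) : List Int :=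
  match sequence.toList with
  | [] => []
  | c0 :: rest =>
    let N : Int := ((rest.length + 1 : Nat) : Int)
    let st := rest.foldl (pvAStep N) (List.replicate (rest.length + 1) (0 : Int), 1, c0)
    if st.2.1 ≤ N then pvIncAt st.1 (st.2.1 - 1).toNat else st.1

-- ===== PORT B =====
-- stage 1 of B: the lengths of the maximal runs (outer while-loop of Source B;
-- the inner while j-scan is the takeWhile)
def pvRunLengths : List Char → List Int
  | [] => []
  | c :: rest =>
    let k := (rest.takeWhile (· == c)).length
    ((k : Int) + 1) :: pvRunLengths (rest.drop k)
termination_by cs => cs.length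
decreasing_by simp [List.length_drop]

def get_run_counts_alt (sequence : String) : List Int :=
  match sequence.toList with
  | [] => []
  | c0 :: rest =>
    (pvRunLengths (c0 :: rest)).foldl (fun counts r => pvIncAt counts (r - 1).toNat)
      (List.replicate (rest.length + 1) (0 : Int))

-- ===== PRECONDITION & SPEC =====
def Spec_get_run_counts (sequence : String) (out : List Int) : Prop := out = get_run_counts_alt sequence
instance (sequence : String) (out : List Int) : Decidable (Spec_get_run_counts sequence out) := by unfold Spec_get_run_counts; infer_instance

-- ===== CLAIM (what is proved, stated in full; the proofs are below) =====
def Claim_equal_get_run_counts : Prop := ∀ (sequence : String), Dom_get_run_counts sequence → Spec_get_run_counts sequence (get_run_counts sequence)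

-- ===== LEMMAS AND PROOFS =====

-- run lengths of (c :: rest) where the first run already has accumulated length rl
def runFrom (c : Char) (rl : Int) : List Char → List Int
  | [] => [rl]
  | d :: rest => if d == c then runFrom c (rl + 1) rest else rl :: runFrom d 1 rest

-- A's guarded tally step
def gTally (N : Int) (counts : List Int) (r : Int) : List Int :=
  if r ≤ N then pvIncAt counts (r - 1).toNat else counts

-- A's loop + final flush = folding the guarded tally over the run lengths
theorem loop_char (N : Int) (rest : List Char) : ∀ (counts : List Int) (rl : Int) (c : Char),
    (let st := rest.foldl (pvAStep N) (counts, rl, c);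
     if st.2.1 ≤ N then pvIncAt st.1 (st.2.1 - 1).toNat else st.1)
    = (runFrom c rl rest).foldl (gTally N) counts := by
  induction rest with
  | nil => intro counts rl c; simp [runFrom, gTally]
  | cons d rest ih =>
    intro counts rl c
    simp only [List.foldl_cons, pvAStep, runFrom]
    by_cases h : (d == c) = true
    · simp only [if_pos h]
      simpa using ih counts (rl + 1) c
    · simp only [if_neg h, List.foldl_cons]
      simpa [gTally] using ih (gTally N counts rl) 1 d

-- every run length produced from an accumulated first run of length rl ≥ 1 is ≤ rl + rest.length
theorem runFrom_le (rest : List Char) : ∀ (c : Char) (rl : Int), 1 ≤ rl →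
    ∀ r ∈ runFrom c rl rest, r ≤ rl + rest.length := by
  induction rest with
  | nil => intro c rl h1 r hr; simp [runFrom] at hr; omega
  | cons d rest ih =>
    intro c rl h1 r hr
    simp only [runFrom] at hr
    by_cases h : (d == c) = true
    · simp [h] at hr
      have := ih c (rl + 1) (by omega) r hr
      simp; omega
    · simp [h] at hr
      rcases hr with hr | hr
      · simp; omega
      · have := ih d 1 (by omega) r hr
        simp at this ⊢; omega

-- runFrom agrees with B's takeWhile/drop grouping
theorem runFrom_eq (rest : List Char) : ∀ (c : Char) (rl : Int),
    runFrom c rl rest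
      = (rl + ((rest.takeWhile (· == c)).length : Int))
        :: pvRunLengths (rest.drop (rest.takeWhile (· == c)).length) := by
  induction rest with
  | nil =>
    intro c rl
    simp only [runFrom, List.takeWhile_nil, List.length_nil, List.drop_nil]
    rw [pvRunLengths]
    simp
  | cons d rest ih =>
    intro c rl
    simp only [runFrom]
    by_cases h : (d == c) = true
    · rw [if_pos h, ih c (rl + 1)]
      simp [List.takeWhile, h]
      omega
    · rw [if_neg h, ih d 1]
      simp [h]
      rw [show pvRunLengths (d :: rest)
            = (((rest.takeWhile (· == d)).length : Int) + 1)
              :: pvRunLengths (rest.drop (rest.takeWhile (· == d)).length)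
          from by rw [pvRunLengths]]
      simp [add_comm]

theorem runFrom_one (c : Char) (rest : List Char) :
    runFrom c 1 rest = pvRunLengths (c :: rest) := by
  rw [runFrom_eq, show pvRunLengths (c :: rest)
        = (((rest.takeWhile (· == c)).length : Int) + 1)
          :: pvRunLengths (rest.drop (rest.takeWhile (· == c)).length)
      from by rw [pvRunLengths]]
  simp [add_comm]

-- the guard in A's tally is vacuous on the actual run lengths
theorem foldl_guard (N : Int) (L : List Int) (h : ∀ r ∈ L, r ≤ N) (counts : List Int) :
    L.foldl (gTally N) counts = L.foldl (fun counts r => pvIncAt counts (r - 1).toNat) counts := by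
  induction L generalizing counts with
  | nil => rfl
  | cons r L ih =>
    simp only [List.foldl_cons, gTally, if_pos (h r (by simp))]
    exact ih (fun r hr => h r (by simp [hr])) _

-- ===== VERDICT (by name: the statement is the Claim_ definition above) =====
theorem get_run_counts_spec : Claim_equal_get_run_counts := by
  intro sequence _
  unfold Spec_get_run_counts get_run_counts get_run_counts_alt
  cases hcs : sequence.toList with
  | nil => rfl
  | cons c0 rest =>
    simp only []
    rw [loop_char]
    rw [runFrom_one]
    apply foldl_guard
    intro r hr
    rw [← runFrom_one] at hr
    have := runFrom_le rest c0 1 (by omega) r hr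
    push_cast
    omega
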